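-- pv_equiv track=rewrite | github.com/BBuf/how-to-optim-algorithm-in-cuda | meagtron-lm/playground.py | generate_data_parallel_groups
-- ===== SOURCE A (Python) =====
-- def generate_data_parallel_groups(world_size, tensor_model_parallel_size, pipeline_model_parallel_size, context_parallel_size):
--     """
--     Generate data parallel groups based on the provided parallelism parameters.
--     """
--     assert world_size % (pipeline_model_parallel_size * tensor_model_parallel_size * context_parallel_size) == 0, "world_size must be divisible by the product of pipeline_model_parallel_size, tensor_model_parallel_size, and context_parallel_size"
--     data_parallel_group_ranks = []
--     num_pipeline_model_parallel_groups = world_size // pipeline_model_parallel_size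
--
--     for i in range(pipeline_model_parallel_size):
--         start_rank = i * num_pipeline_model_parallel_groups
--         end_rank = (i + 1) * num_pipeline_model_parallel_groups
--         for j in range(context_parallel_size * tensor_model_parallel_size):
--             ranks = range(
--                 start_rank + j, end_rank, context_parallel_size * tensor_model_parallel_size
--             )
--             data_parallel_group_ranks.append(list(ranks))
--     return data_parallel_group_ranks
-- ===== SOURCE B (Python) =====
-- def generate_data_parallel_groups(world_size, tensor_model_parallel_size, pipeline_model_parallel_size, context_parallel_size):
--     """
--     Generate data parallel groups based on the provided parallelism parameters.
--     """
--     assert world_size % (pipeline_model_parallel_size * tensor_model_parallel_size * context_parallel_size) == 0, "world_size must be divisible by the product of pipeline_model_parallel_size, tensor_model_parallel_size, and context_parallel_size"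
--     step = context_parallel_size * tensor_model_parallel_size
--     num_pipeline_model_parallel_groups = world_size // pipeline_model_parallel_size
--     buckets = {k: [] for k in range(pipeline_model_parallel_size * step)}
--     for rank in range(world_size):
--         i = rank // num_pipeline_model_parallel_groups
--         j = (rank % num_pipeline_model_parallel_groups) % step
--         buckets[i * step + j].append(rank)
--     return list(buckets.values())
-- ===== Notes on version B (the rewrite author's own statement) =====
-- stated objective: alternative
-- what changed: A materialises each group with a nested loop over (pipeline block, offset) building range objects; B builds an insertion-ordered dict of p*(c*t) empty buckets and fills it in one pass over all ranks, computing each rank's bucket index arithmetically.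
-- outside the precondition, e.g. on generate_data_parallel_groups(4, 1, -1, 1): A returns [], B raises KeyError; on generate_data_parallel_groups(-2, 1, -1, -1): A returns [], B returns [[]]
import Mathlib
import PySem

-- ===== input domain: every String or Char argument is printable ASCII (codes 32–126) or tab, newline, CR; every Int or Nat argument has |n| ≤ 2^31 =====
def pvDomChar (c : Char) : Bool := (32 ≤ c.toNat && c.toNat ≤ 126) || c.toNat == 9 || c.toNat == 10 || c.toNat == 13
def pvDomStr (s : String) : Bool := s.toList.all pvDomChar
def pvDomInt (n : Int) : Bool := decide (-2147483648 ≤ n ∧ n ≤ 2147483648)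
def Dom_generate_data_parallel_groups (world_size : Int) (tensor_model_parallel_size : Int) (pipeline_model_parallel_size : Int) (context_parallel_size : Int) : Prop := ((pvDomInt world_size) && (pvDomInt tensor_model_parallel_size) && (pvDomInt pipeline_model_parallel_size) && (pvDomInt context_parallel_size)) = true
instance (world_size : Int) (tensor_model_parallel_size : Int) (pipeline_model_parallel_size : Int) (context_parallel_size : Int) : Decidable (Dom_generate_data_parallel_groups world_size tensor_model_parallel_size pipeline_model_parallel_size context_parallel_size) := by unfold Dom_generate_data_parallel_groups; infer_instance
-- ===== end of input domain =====

-- B replaces A's nested group-construction loops by a one-pass bucket fill over all ranks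
-- (an insertion-ordered dict of empty groups, each rank appended to its arithmetically
-- computed bucket); alternative decomposition, same asymptotic cost.

-- ===== PORT A =====
-- the Python assert (AssertionError, or ZeroDivisionError when the size product is 0) is excluded by Pre_
def generate_data_parallel_groups (world_size : Int) (tensor_model_parallel_size : Int) (pipeline_model_parallel_size : Int) (context_parallel_size : Int) : List (List Int) :=
  let num_pipeline_model_parallel_groups := PySem.Int.floordiv world_size pipeline_model_parallel_size
  (PySem.List.pyRange 0 pipeline_model_parallel_size 1).foldl (fun acc i =>
    let start_rank := i * num_pipeline_model_parallel_groups
    let end_rank := (i + 1) * num_pipeline_model_parallel_groups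
    (PySem.List.pyRange 0 (context_parallel_size * tensor_model_parallel_size) 1).foldl
      (fun acc2 j =>
        acc2 ++ [PySem.List.pyRange (start_rank + j) end_rank (context_parallel_size * tensor_model_parallel_size)])
      acc) []

-- ===== PORT B =====
-- the Python assert is excluded by Pre_; Python's buckets[...] raises KeyError on a missing
-- key where Dict.modify would insert it — inside Pre_ every computed bucket key is present,
-- so the port is exact there (missing keys occur only outside Pre_)
def generate_data_parallel_groups_alt (world_size : Int) (tensor_model_parallel_size : Int) (pipeline_model_parallel_size : Int) (context_parallel_size : Int) : List (List Int) :=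
  let step := context_parallel_size * tensor_model_parallel_size
  let num_pipeline_model_parallel_groups := PySem.Int.floordiv world_size pipeline_model_parallel_size
  let buckets : PySem.Dict Int (List Int) :=
    (PySem.List.pyRange 0 (pipeline_model_parallel_size * step) 1).foldl
      (fun d k => d.insert k []) PySem.Dict.empty
  let filled :=
    (PySem.List.pyRange 0 world_size 1).foldl
      (fun d rank =>
        d.modify
          (PySem.Int.floordiv rank num_pipeline_model_parallel_groups * step
            + PySem.Int.mod (PySem.Int.mod rank num_pipeline_model_parallel_groups) step)
          [] (fun g => g ++ [rank]))
      buckets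
  filled.values

-- ===== PRECONDITION & SPEC =====
-- Pre_ excludes (a) inputs where A raises (the assert fails, or the size product is 0) and
-- (b) sign-accident inputs (a non-positive parallel size whose product still divides
-- world_size, with the degenerate agreeing cases kept inside) on which A returns an
-- accidental [] while B raises KeyError or returns a different number of empty buckets.
def Pre_generate_data_parallel_groups (world_size : Int) (tensor_model_parallel_size : Int) (pipeline_model_parallel_size : Int) (context_parallel_size : Int) : Prop :=
  pipeline_model_parallel_size * tensor_model_parallel_size * context_parallel_size ≠ 0 ∧
  (pipeline_model_parallel_size * tensor_model_parallel_size * context_parallel_size) ∣ world_size ∧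
  (0 < pipeline_model_parallel_size ∧ 0 < context_parallel_size * tensor_model_parallel_size ∨
    world_size ≤ 0 ∧ pipeline_model_parallel_size * (context_parallel_size * tensor_model_parallel_size) ≤ 0)
instance (world_size : Int) (tensor_model_parallel_size : Int) (pipeline_model_parallel_size : Int) (context_parallel_size : Int) : Decidable (Pre_generate_data_parallel_groups world_size tensor_model_parallel_size pipeline_model_parallel_size context_parallel_size) := by unfold Pre_generate_data_parallel_groups; infer_instance

def pvWitness_generate_data_parallel_groups : Int × Int × Int × Int := (8, 2, 2, 1)

def Spec_generate_data_parallel_groups (world_size : Int) (tensor_model_parallel_size : Int) (pipeline_model_parallel_size : Int) (context_parallel_size : Int) (out : List (List Int)) : Prop := out = generate_data_parallel_groups_alt world_size tensor_model_parallel_size pipeline_model_parallel_size context_parallel_size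
instance (world_size : Int) (tensor_model_parallel_size : Int) (pipeline_model_parallel_size : Int) (context_parallel_size : Int) (out : List (List Int)) : Decidable (Spec_generate_data_parallel_groups world_size tensor_model_parallel_size pipeline_model_parallel_size context_parallel_size out) := by unfold Spec_generate_data_parallel_groups; infer_instance

-- ===== CLAIM (what is proved, stated in full; the proofs are below) =====
def Claim_equal_generate_data_parallel_groups : Prop := ∀ (world_size : Int) (tensor_model_parallel_size : Int) (pipeline_model_parallel_size : Int) (context_parallel_size : Int), Dom_generate_data_parallel_groups world_size tensor_model_parallel_size pipeline_model_parallel_size context_parallel_size → Pre_generate_data_parallel_groups world_size tensor_model_parallel_size pipeline_model_parallel_size context_parallel_size → Spec_generate_data_parallel_groups world_size tensor_model_parallel_size pipeline_model_parallel_size context_parallel_size (generate_data_parallel_groups world_size tensor_model_parallel_size pipeline_model_parallel_size context_parallel_size)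

-- ===== LEMMAS AND PROOFS =====

-- nil and cons forms for a positive-step pyRange
theorem pvRange_pos_nil (a b st : Int) (hst : 0 < st) (h : b ≤ a) :
    PySem.List.pyRange a b st = [] := by
  rw [PySem.List.pyRange_of_pos a b hst, if_neg (by omega)]
  simp

theorem pvRange_pos_cons (a b st : Int) (hst : 0 < st) (hab : a < b) :
    PySem.List.pyRange a b st = a :: PySem.List.pyRange (a + st) b st := by
  rw [PySem.List.pyRange_of_pos a b hst, PySem.List.pyRange_of_pos (a + st) b hst, if_pos hab]
  have h0 : 0 ≤ b - (a + st) + st - 1 := by omega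
  have hX : (if a + st < b then ((b - (a + st) + st - 1) / st).toNat else 0)
      = ((b - (a + st) + st - 1) / st).toNat := by
    split
    · rfl
    · have hz : (b - (a + st) + st - 1) / st = 0 :=
        Int.ediv_eq_zero_of_lt h0 (by omega)
      rw [hz]; rfl
  rw [hX]
  have hdiv : (b - a + st - 1) / st = (b - (a + st) + st - 1) / st + 1 := by
    have e : b - a + st - 1 = (b - (a + st) + st - 1) + 1 * st := by ring
    rw [e, Int.add_mul_ediv_right _ _ (by omega : st ≠ 0)]
  have hge : 0 ≤ (b - (a + st) + st - 1) / st := Int.ediv_nonneg h0 (by omega)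
  rw [hdiv, Int.toNat_add hge (by norm_num)]
  rw [show ((b - (a + st) + st - 1) / st).toNat + (1 : Int).toNat
      = ((b - (a + st) + st - 1) / st).toNat + 1 from rfl]
  rw [List.range_succ_eq_map]
  simp only [List.map_cons, List.map_map]
  congr 1
  · simp
  · apply List.map_congr_left
    intro k _
    simp only [Function.comp]
    push_cast
    ring

-- PySem.Set.update is the identity when every element is already present
theorem pvSet_update_of_mem {α : Type} [BEq α] [LawfulBEq α] (xs : List α) :
    ∀ (s : PySem.Set α), (∀ x ∈ xs, x ∈ s) → PySem.Set.update s xs = s := by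
  induction xs with
  | nil => intro s _; exact PySem.Set.update_nil s
  | cons x xs ih =>
    intro s h
    rw [PySem.Set.update_cons, PySem.Set.add_of_mem (h x (by simp))]
    exact ih s (fun y hy => h y (by simp [hy]))

-- Bool-level cancellation for ==
theorem pvBeqShift (x y z : Int) : (x + y == x + z) = (y == z) := by
  rw [Bool.eq_iff_iff]
  simp

-- A's output in flatMap/map form
theorem pvAShape (ws t p c : Int) :
    generate_data_parallel_groups ws t p c =
      (PySem.List.pyRange 0 p 1).flatMap (fun i =>
        (PySem.List.pyRange 0 (c * t) 1).map (fun j =>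
          PySem.List.pyRange (i * PySem.Int.floordiv ws p + j)
            ((i + 1) * PySem.Int.floordiv ws p) (c * t))) := by
  unfold generate_data_parallel_groups
  simp only [PySem.List.foldl_append_singleton_eq_map]
  rw [PySem.List.foldl_append_eq_flatMap]
  simp

-- decomposition of [0, p*st) into p blocks of st consecutive indices
theorem pvRangeMul (p st : Int) (hst : 0 < st) (hp : 0 ≤ p) :
    PySem.List.pyRange 0 (p * st) 1 =
      (PySem.List.pyRange 0 p 1).flatMap (fun i =>
        (PySem.List.pyRange 0 st 1).map (fun j => i * st + j)) := by
  induction p, hp using Int.le_induction with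
  | base => simp [PySem.List.pyRange_one_eq_nil]
  | succ p hp ih =>
    have h1 : (0 : Int) ≤ p * st := mul_nonneg hp (le_of_lt hst)
    have h2 : p * st ≤ (p + 1) * st := by nlinarith
    rw [PySem.List.pyRange_one_append 0 (p * st) ((p + 1) * st) h1 h2,
      PySem.List.pyRange_one_succ_right (by omega : (0:Int) ≤ p)]
    rw [List.flatMap_append, ih]
    congr 1
    simp only [List.flatMap_cons, List.flatMap_nil, List.append_nil]
    rw [PySem.List.pyRange_one, PySem.List.pyRange_one]
    simp only [List.map_map]
    have e : ((p + 1) * st - p * st).toNat = (st - 0).toNat := by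
      congr 1; ring
    rw [e]
    apply List.map_congr_left
    intro k _
    simp [Function.comp]

-- the ranks of one st-aligned block that hit residue j, in order
theorem pvFilterBlock (st j : Int) (hst : 0 < st) (hj0 : 0 ≤ j) (hjst : j < st) :
    ∀ (m : Nat) (a : Int),
      (PySem.List.pyRange a (a + st * (m : Int)) 1).filter
        (fun r => PySem.Int.mod (r - a) st == j)
      = PySem.List.pyRange (a + j) (a + st * (m : Int)) st := by
  intro m
  induction m with
  | zero =>
    intro a
    simp only [Nat.cast_zero, mul_zero, add_zero]
    rw [PySem.List.pyRange_one_eq_nil (le_refl a), pvRange_pos_nil (a + j) a st hst (by omega)]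
    rfl
  | succ m ih =>
    intro a
    have hcast : ((m + 1 : Nat) : Int) = (m : Int) + 1 := by push_cast; ring
    have hm0 : 0 ≤ st * (m : Int) := mul_nonneg (le_of_lt hst) (by positivity)
    have hsplit : a + st * ((m + 1 : Nat) : Int) = (a + st) + st * (m : Int) := by
      rw [hcast]; ring
    rw [hsplit]
    rw [PySem.List.pyRange_one_append a (a + st) ((a + st) + st * (m : Int)) (by omega) (by omega)]
    rw [List.filter_append]
    -- first block [a, a+st) contributes exactly [a+j]
    have hfirst : (PySem.List.pyRange a (a + st) 1).filter
        (fun r => PySem.Int.mod (r - a) st == j) = [a + j] := by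
      rw [PySem.List.pyRange_one_append a (a + j) (a + st) (by omega) (by omega),
        PySem.List.pyRange_one_append (a + j) (a + j + 1) (a + st) (by omega) (by omega)]
      rw [List.filter_append, List.filter_append]
      have e1 : (PySem.List.pyRange a (a + j) 1).filter
          (fun r => PySem.Int.mod (r - a) st == j) = [] := by
        rw [List.filter_eq_nil_iff]
        intro r hr
        rw [PySem.List.mem_pyRange_one] at hr
        rw [PySem.Int.mod_eq_emod_of_pos hst, Int.emod_eq_of_lt (by omega) (by omega)]
        simp only [beq_iff_eq]
        omega
      have e2 : (PySem.List.pyRange (a + j) (a + j + 1) 1).filter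
          (fun r => PySem.Int.mod (r - a) st == j) = [a + j] := by
        rw [PySem.List.pyRange_one_singleton]
        have hjj : PySem.Int.mod j st = j := by
          rw [PySem.Int.mod_eq_emod_of_pos hst]
          exact Int.emod_eq_of_lt hj0 hjst
        simp [List.filter, hjj]
      have e3 : (PySem.List.pyRange (a + j + 1) (a + st) 1).filter
          (fun r => PySem.Int.mod (r - a) st == j) = [] := by
        rw [List.filter_eq_nil_iff]
        intro r hr
        rw [PySem.List.mem_pyRange_one] at hr
        rw [PySem.Int.mod_eq_emod_of_pos hst, Int.emod_eq_of_lt (by omega) (by omega)]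
        simp only [beq_iff_eq]
        omega
      rw [e1, e2, e3]
      rfl
    -- second block: shift the base point and use the induction hypothesis
    have hsecond : (PySem.List.pyRange (a + st) ((a + st) + st * (m : Int)) 1).filter
        (fun r => PySem.Int.mod (r - a) st == j)
        = PySem.List.pyRange ((a + st) + j) ((a + st) + st * (m : Int)) st := by
      rw [← ih (a + st)]
      apply List.filter_congr
      intro r _
      have e : r - a = (r - (a + st)) + st * 1 := by ring
      rw [PySem.Int.mod_eq_emod_of_pos hst, PySem.Int.mod_eq_emod_of_pos hst, e,
        Int.add_mul_emod_self_left]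
    rw [hfirst, hsecond]
    have hcons : PySem.List.pyRange (a + j) ((a + st) + st * (m : Int)) st
        = (a + j) :: PySem.List.pyRange ((a + j) + st) ((a + st) + st * (m : Int)) st := by
      apply pvRange_pos_cons _ _ _ hst
      omega
    rw [hcons]
    rw [show (a + j) + st = (a + st) + j from by ring]
    rfl

-- the ranks of [0, ws) whose bucket index is i*st+j form exactly A's group (i, j)
theorem pvFilterMain (ws p st npp : Int) (hp : 0 < p) (hst : 0 < st)
    (hnpp : npp * p = ws) (hstd : st ∣ npp) (i j : Int)
    (hi0 : 0 ≤ i) (hip : i < p) (hj0 : 0 ≤ j) (hjst : j < st) :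
    (PySem.List.pyRange 0 ws 1).filter
      (fun r => PySem.Int.floordiv r npp * st + PySem.Int.mod (PySem.Int.mod r npp) st
        == i * st + j)
    = PySem.List.pyRange (i * npp + j) ((i + 1) * npp) st := by
  by_cases hws : 0 < ws
  · have hnpp0 : 0 < npp := by nlinarith
    obtain ⟨q, hq⟩ := hstd
    have hq0 : 0 < q := by nlinarith
    have hble : i * npp ≤ ws := by nlinarith
    have hble2 : (i + 1) * npp ≤ ws := by nlinarith
    have h0le : (0 : Int) ≤ i * npp := mul_nonneg hi0 (le_of_lt hnpp0)
    have hmid : i * npp ≤ (i + 1) * npp := by nlinarith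
    rw [PySem.List.pyRange_one_append 0 (i * npp) ws h0le hble,
      PySem.List.pyRange_one_append (i * npp) ((i + 1) * npp) ws hmid hble2,
      List.filter_append, List.filter_append]
    have hleft : (PySem.List.pyRange 0 (i * npp) 1).filter
        (fun r => PySem.Int.floordiv r npp * st + PySem.Int.mod (PySem.Int.mod r npp) st
          == i * st + j) = [] := by
      rw [List.filter_eq_nil_iff]
      intro r hr
      rw [PySem.List.mem_pyRange_one] at hr
      have hdr : PySem.Int.floordiv r npp < i :=
        (PySem.Int.floordiv_lt_iff_lt_mul hnpp0).mpr hr.2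
      have hdr0 : 0 ≤ PySem.Int.floordiv r npp :=
        (PySem.Int.le_floordiv_iff_mul_le hnpp0).mpr (by simpa using hr.1)
      have hjm0 : 0 ≤ PySem.Int.mod (PySem.Int.mod r npp) st := PySem.Int.mod_nonneg _ hst
      have hjm1 : PySem.Int.mod (PySem.Int.mod r npp) st < st := PySem.Int.mod_lt _ hst
      have hmul : (PySem.Int.floordiv r npp + 1) * st ≤ i * st :=
        mul_le_mul_of_nonneg_right (by omega) (le_of_lt hst)
      have e : (PySem.Int.floordiv r npp + 1) * st = PySem.Int.floordiv r npp * st + st := by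
        ring
      simp only [beq_iff_eq]
      have hjs : 0 ≤ j := hj0
      nlinarith
    have hright : (PySem.List.pyRange ((i + 1) * npp) ws 1).filter
        (fun r => PySem.Int.floordiv r npp * st + PySem.Int.mod (PySem.Int.mod r npp) st
          == i * st + j) = [] := by
      rw [List.filter_eq_nil_iff]
      intro r hr
      rw [PySem.List.mem_pyRange_one] at hr
      have hdr : i + 1 ≤ PySem.Int.floordiv r npp :=
        (PySem.Int.le_floordiv_iff_mul_le hnpp0).mpr hr.1
      have hjm0 : 0 ≤ PySem.Int.mod (PySem.Int.mod r npp) st := PySem.Int.mod_nonneg _ hst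
      have hmul : (i + 1) * st ≤ PySem.Int.floordiv r npp * st :=
        mul_le_mul_of_nonneg_right hdr (le_of_lt hst)
      simp only [beq_iff_eq]
      nlinarith
    have hmid2 : (PySem.List.pyRange (i * npp) ((i + 1) * npp) 1).filter
        (fun r => PySem.Int.floordiv r npp * st + PySem.Int.mod (PySem.Int.mod r npp) st
          == i * st + j)
        = PySem.List.pyRange (i * npp + j) ((i + 1) * npp) st := by
      have hcongr : (PySem.List.pyRange (i * npp) ((i + 1) * npp) 1).filter
          (fun r => PySem.Int.floordiv r npp * st + PySem.Int.mod (PySem.Int.mod r npp) st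
            == i * st + j)
          = (PySem.List.pyRange (i * npp) ((i + 1) * npp) 1).filter
            (fun r => PySem.Int.mod (r - i * npp) st == j) := by
        apply List.filter_congr
        intro r hr
        rw [PySem.List.mem_pyRange_one] at hr
        have hfd : PySem.Int.floordiv r npp = i :=
          (PySem.Int.floordiv_eq_iff_of_pos hnpp0).mpr ⟨hr.1, hr.2⟩
        have hmod : PySem.Int.mod r npp = r - i * npp := by
          have h := PySem.Int.floordiv_mul_add_mod r npp
          rw [hfd] at h
          linarith
        rw [hfd, hmod]
        exact pvBeqShift (i * st) _ _
      rw [hcongr]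
      have hqt : ((q.toNat : Int)) = q := Int.toNat_of_nonneg (le_of_lt hq0)
      have hub : (i + 1) * npp = i * npp + st * ((q.toNat : Nat) : Int) := by
        rw [hqt]
        rw [hq]; ring
      rw [hub]
      exact pvFilterBlock st j hst hj0 hjst q.toNat (i * npp)
    rw [hleft, hright, hmid2]
    simp
  · -- ws ≤ 0 : no ranks, and every group is empty
    have hnpple : npp ≤ 0 := by nlinarith
    rw [PySem.List.pyRange_one_eq_nil (by omega)]
    rw [pvRange_pos_nil _ _ _ hst (by nlinarith)]
    rfl

-- B's output as a map of filters over the flat bucket indices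
theorem pvAltShape (ws t p c : Int) (hp : 0 < p) (hst : 0 < c * t)
    (hexact : PySem.Int.floordiv ws p * p = ws) :
    generate_data_parallel_groups_alt ws t p c =
      (PySem.List.pyRange 0 (p * (c * t)) 1).map (fun k =>
        (PySem.List.pyRange 0 ws 1).filter (fun r =>
          PySem.Int.floordiv r (PySem.Int.floordiv ws p) * (c * t)
            + PySem.Int.mod (PySem.Int.mod r (PySem.Int.floordiv ws p)) (c * t) == k)) := by
  unfold generate_data_parallel_groups_alt
  simp only []
  set st := c * t with hstdef
  set npp := PySem.Int.floordiv ws p with hnppdef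
  set key : Int → Int := fun r => PySem.Int.floordiv r npp * st + PySem.Int.mod (PySem.Int.mod r npp) st with hkey
  set ks : List Int := PySem.List.pyRange 0 (p * st) 1 with hks
  set ranks : List Int := PySem.List.pyRange 0 ws 1 with hranks
  set buckets : PySem.Dict Int (List Int) :=
    ks.foldl (fun d k => d.insert k []) PySem.Dict.empty with hbuckets
  set filled : PySem.Dict Int (List Int) :=
    ranks.foldl (fun d rank => d.modify (key rank) [] (fun g => g ++ [rank])) buckets
    with hfilled
  -- the initial dict is the bucket keys in order, all mapped to []
  have hitems : buckets.items = ks.map (fun k => (k, ([] : List Int))) := by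
    rw [hbuckets]
    have h := PySem.Dict.items_foldl_insert_fresh (l := ks) (k := fun x => x)
      (v := fun _ => ([] : List Int)) PySem.Dict.empty
      (by intro a _; simp [PySem.Dict.contains_empty])
      (by simpa using PySem.List.nodup_pyRange_one 0 (p * st))
    simpa using h
  have hkeys : buckets.keys = ks := by
    simp only [PySem.Dict.keys, hitems, List.map_map]
    exact List.map_id ks
  have hkeysnd : buckets.keys.Nodup := by
    rw [hkeys, hks]; exact PySem.List.nodup_pyRange_one 0 (p * st)
  -- every rank's key is one of the bucket keys
  have hkeyin : ∀ r ∈ ranks, key r ∈ ks := by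
    intro r hr
    rw [hranks, PySem.List.mem_pyRange_one] at hr
    have hws : 0 < ws := by omega
    have hnpp : 0 < npp := by nlinarith [hexact]
    have hdr0 : 0 ≤ PySem.Int.floordiv r npp :=
      (PySem.Int.le_floordiv_iff_mul_le hnpp).mpr (by simpa using hr.1)
    have hdrp : PySem.Int.floordiv r npp < p :=
      (PySem.Int.floordiv_lt_iff_lt_mul hnpp).mpr (by nlinarith [hexact])
    have hjm0 : 0 ≤ PySem.Int.mod (PySem.Int.mod r npp) st := PySem.Int.mod_nonneg _ hst
    have hjm1 : PySem.Int.mod (PySem.Int.mod r npp) st < st := PySem.Int.mod_lt _ hst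
    rw [hks, PySem.List.mem_pyRange_one]
    constructor
    · have := mul_nonneg hdr0 (le_of_lt hst)
      simp only [hkey]
      omega
    · have : (PySem.Int.floordiv r npp + 1) * st ≤ p * st :=
        mul_le_mul_of_nonneg_right (by omega) (le_of_lt hst)
      simp only [hkey]
      nlinarith
  have hfkeys : filled.keys = ks := by
    rw [hfilled, PySem.Dict.keys_foldl_modify_key, hkeys]
    exact pvSet_update_of_mem _ _ (by
      intro x hx
      rw [List.mem_map] at hx
      obtain ⟨r, hr, rfl⟩ := hx
      exact hkeyin r hr)
  have hfnd : filled.keys.Nodup := by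
    rw [hfkeys, hks]; exact PySem.List.nodup_pyRange_one 0 (p * st)
  have hvals : filled.values = filled.keys.map (fun k => filled.getD k []) :=
    PySem.Dict.values_eq_map_keys filled hfnd []
  rw [hvals, hfkeys]
  apply List.map_congr_left
  intro k hk
  -- compute filled.getD k []
  have hpair : filled = (ranks.map (fun r => (key r, r))).foldl
      (fun d pr => d.modify pr.1 [] (fun g => g ++ [pr.2])) buckets := by
    rw [List.foldl_map]
  have hg := PySem.Dict.getD_foldl_modify_append
    (ranks.map (fun r => (key r, r))) buckets k
  rw [← hpair] at hg
  have hb0 : buckets.getD k [] = [] := by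
    apply PySem.Dict.getD_of_mem_items buckets _ hkeysnd
    rw [hitems, List.mem_map]
    exact ⟨k, hk, rfl⟩
  rw [hg, hb0, List.nil_append]
  rw [List.filter_map, List.map_map]
  have : ((fun pr : Int × Int => pr.1 == k) ∘ fun r => (key r, r)) = fun r => key r == k := rfl
  rw [this]
  have : ((fun pr : Int × Int => pr.2) ∘ fun r => (key r, r)) = id := rfl
  rw [this, List.map_id]

-- ===== VERDICT (by name: the statement is the Claim_ definition above) =====
theorem generate_data_parallel_groups_spec : Claim_equal_generate_data_parallel_groups := by
  intro ws t p c _ hpre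
  obtain ⟨hne, hdvd, hcase⟩ := hpre
  unfold Spec_generate_data_parallel_groups
  have hne' : p * (c * t) ≠ 0 := by
    intro h; apply hne; nlinarith [h]
  rcases hcase with ⟨hp, hst⟩ | ⟨hws, hprod⟩
  · -- main case: positive pipeline size and positive step
    have hpdvd : p ∣ ws := dvd_trans ⟨t * c, by ring⟩ hdvd
    have hnpp : PySem.Int.floordiv ws p * p = ws := by
      have h1 := PySem.Int.floordiv_mul_add_mod ws p
      have h2 : PySem.Int.mod ws p = 0 := (PySem.Int.mod_eq_zero_iff_dvd ws p).mpr hpdvd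
      omega
    obtain ⟨u, hu⟩ := hdvd
    have hstd : (c * t) ∣ PySem.Int.floordiv ws p := by
      refine ⟨u, ?_⟩
      have : PySem.Int.floordiv ws p * p = ((c * t) * u) * p := by
        rw [hnpp, hu]; ring
      have hpne : p ≠ 0 := by omega
      exact mul_right_cancel₀ hpne this
    rw [pvAShape, pvAltShape ws t p c hp hst hnpp,
      pvRangeMul p (c * t) hst (le_of_lt hp), List.map_flatMap]
    apply congrArg List.flatten
    apply List.map_congr_left
    intro i hi
    rw [PySem.List.mem_pyRange_one] at hi
    rw [List.map_map]
    apply List.map_congr_left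
    intro j hj
    rw [PySem.List.mem_pyRange_one] at hj
    simp only [Function.comp]
    rw [pvFilterMain ws p (c * t) (PySem.Int.floordiv ws p) hp hst hnpp hstd i j
      (by omega) hi.2 (by omega) hj.2]
  · -- degenerate case: world_size ≤ 0 and non-positive bucket count, both sides empty
    have hprodlt : p * (c * t) < 0 := lt_of_le_of_ne hprod hne'
    have hA : generate_data_parallel_groups ws t p c = [] := by
      rw [pvAShape]
      rcases lt_trichotomy p 0 with hplt | hpz | hpgt
      · rw [PySem.List.pyRange_one_eq_nil (by omega : p ≤ 0)]
        simp
      · exact absurd (by rw [hpz, zero_mul]) hne'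
      · have hstlt : c * t < 0 := by nlinarith
        have : PySem.List.pyRange 0 (c * t) 1 = [] :=
          PySem.List.pyRange_one_eq_nil (by omega)
        simp [this]
    have hB : generate_data_parallel_groups_alt ws t p c = [] := by
      unfold generate_data_parallel_groups_alt
      simp only []
      rw [PySem.List.pyRange_one_eq_nil (by omega : p * (c * t) ≤ 0),
        PySem.List.pyRange_one_eq_nil (by omega : ws ≤ 0)]
      simp [PySem.Dict.empty, PySem.Dict.values]
    rw [hA, hB]
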